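-- pv_equiv track=rewrite | github.com/ankitksr/duckworth-dugout | pipeline/intel/records.py | _filter_active
-- ===== SOURCE A (Python) =====
-- def _filter_active(entries: list[dict], active: set[str]) -> list[dict]:
--     """Drop entries whose player name doesn't match any active squad member.
--
--     Strict full-name match by default (case-insensitive). Falls back to
--     initial-style matching ("V Kohli" → "Virat Kohli") only when the LLM
--     output starts with a single-letter token. Surname-only matching is
--     deliberately avoided — it lets hallucinated names like "Umesh Yadav"
--     slip through whenever any other Yadav exists in the squad.
--     """
--     if not active:
--         return entries  # no filter available, keep all
--
--     active_lower = {a.lower() for a in active if a.strip()}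
--     # Pre-build (initial, surname) → set of full names for the fallback
--     by_initial_surname: dict[tuple[str, str], set[str]] = {}
--     for full in active_lower:
--         toks = full.split()
--         if len(toks) >= 2:
--             by_initial_surname.setdefault((toks[0][0], toks[-1]), set()).add(full)
--
--     filtered: list[dict] = []
--     for e in entries:
--         name = e.get("player", "").strip().lower()
--         if not name:
--             continue
--         if name in active_lower:
--             filtered.append(e)
--             continue
--         # Initial-style fallback: "V Kohli" → match if exactly one squad
--         # player has surname "kohli" with first name starting with "v".
--         toks = name.split()
--         if len(toks) >= 2 and len(toks[0]) == 1:
--             candidates = by_initial_surname.get((toks[0], toks[-1]), set())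
--             if len(candidates) == 1:
--                 filtered.append(e)
--     return filtered
-- ===== SOURCE B (Python) =====
-- def _filter_active(entries: list[dict], active: set[str]) -> list[dict]:
--     """Drop entries whose player name doesn't match any active squad member.
--
--     Same semantics as the original, but without the precomputed
--     (initial, surname) index: the rare initial-style fallback counts
--     matching squad members by a direct scan of active_lower.
--     """
--     if not active:
--         return entries
--
--     active_lower = {a.lower() for a in active if a.strip()}
--
--     filtered: list[dict] = []
--     for e in entries:
--         name = e.get("player", "").strip().lower()
--         if not name:
--             continue
--         if name in active_lower:
--             filtered.append(e)
--             continue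
--         toks = name.split()
--         if len(toks) >= 2 and len(toks[0]) == 1:
--             count = 0
--             for full in active_lower:
--                 a_toks = full.split()
--                 if len(a_toks) >= 2 and a_toks[0][0] == toks[0][0] and a_toks[-1] == toks[-1]:
--                     count += 1
--             if count == 1:
--                 filtered.append(e)
--     return filtered
-- ===== Notes on version B (the rewrite author's own statement) =====
-- stated objective: simpler
-- what changed: Deleted the precomputed (initial, surname) -> set-of-names index; the initial-style fallback instead counts matching squad members by a direct scan of active_lower, keeping the entry iff the count is exactly 1.
import Mathlib
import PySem

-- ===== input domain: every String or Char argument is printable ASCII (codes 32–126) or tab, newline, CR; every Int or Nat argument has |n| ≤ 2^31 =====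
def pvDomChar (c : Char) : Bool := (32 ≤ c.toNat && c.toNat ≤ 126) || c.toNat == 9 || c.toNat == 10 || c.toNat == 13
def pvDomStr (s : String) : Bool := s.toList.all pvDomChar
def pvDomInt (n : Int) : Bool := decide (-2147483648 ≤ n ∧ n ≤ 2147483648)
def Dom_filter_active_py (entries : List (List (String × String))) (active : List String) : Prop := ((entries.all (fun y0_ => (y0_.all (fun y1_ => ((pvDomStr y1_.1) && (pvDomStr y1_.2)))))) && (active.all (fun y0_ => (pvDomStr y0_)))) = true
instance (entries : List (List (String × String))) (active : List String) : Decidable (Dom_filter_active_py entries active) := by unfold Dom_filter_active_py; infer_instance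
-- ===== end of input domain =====

-- B replaces A's precomputed (initial, surname) → set-of-names index by a direct counting
-- scan of active_lower in the (rare) initial-style fallback branch; objective: simpler.

-- ===== PORT A =====
-- shared by both Pythons: active_lower = {a.lower() for a in active if a.strip()}
def pvActiveLower (active : List String) : PySem.Set String :=
  PySem.Set.ofList ((active.filter (fun a => PySem.Str.strip a ≠ "")).map PySem.Str.lower)

-- shared by both Pythons: name = e.get("player", "").strip().lower()
def pvName (e : List (String × String)) : String :=
  PySem.Str.lower (PySem.Str.strip ((PySem.Dict.mk e).getD "player" ""))

-- (toks[0][0], toks[-1]) when len(toks) >= 2, else no key.  split() tokens are nonempty,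
-- so the .getD defaults for toks[0][0] and toks[-1] are never reached (exact).
def pvKey (full : String) : Option (Char × String) :=
  let toks := PySem.Str.split₀ full
  if 2 ≤ toks.length then
    some ((PySem.Str.pyGet? (toks.headD "") 0).getD ' ', toks.getLast?.getD "")
  else none

-- the by_initial_surname dict of A (setdefault(...).add(full) = insert of the grown set)
def pvBuildIdx (al : List String) : PySem.Dict (Char × String) (PySem.Set String) :=
  al.foldl (fun d full =>
    match pvKey full with
    | some k => d.insert k (PySem.Set.add (d.getD k PySem.Set.empty) full)
    | none => d) PySem.Dict.empty

def filter_active_py (entries : List (List (String × String))) (active : List String) : List (List (String × String)) :=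
  if active = [] then entries
  else
    let active_lower := pvActiveLower active
    let by_initial_surname := pvBuildIdx active_lower
    entries.foldl (fun filtered e =>
      let name := pvName e
      if name = "" then filtered
      else if PySem.Set.contains active_lower name then filtered ++ [e]
      else
        let toks := PySem.Str.split₀ name
        if 2 ≤ toks.length ∧ PySem.Str.len (toks.headD "") = 1 then
          -- lookup key (toks[0], toks[-1]); toks[0] has length 1, represented by its character
          let candidates := by_initial_surname.getD
            ((PySem.Str.pyGet? (toks.headD "") 0).getD ' ', toks.getLast?.getD "") PySem.Set.empty
          if PySem.Set.len candidates = 1 then filtered ++ [e] else filtered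
        else filtered) []

-- ===== PORT B =====
def filter_active_py_alt (entries : List (List (String × String))) (active : List String) : List (List (String × String)) :=
  if active = [] then entries
  else
    let active_lower := pvActiveLower active
    entries.foldl (fun acc e =>
      let name := pvName e
      if name = "" then acc
      else if PySem.Set.contains active_lower name then acc ++ [e]
      else
        let toks := PySem.Str.split₀ name
        if 2 ≤ toks.length ∧ PySem.Str.len (toks.headD "") = 1 then
          let cnt := active_lower.foldl (fun c full =>
            let a_toks := PySem.Str.split₀ full
            if 2 ≤ a_toks.length ∧
                (PySem.Str.pyGet? (a_toks.headD "") 0).getD ' ' = (PySem.Str.pyGet? (toks.headD "") 0).getD ' ' ∧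
                a_toks.getLast?.getD "" = toks.getLast?.getD "" then c + 1 else c) (0 : Int)
          if cnt = 1 then acc ++ [e] else acc
        else acc) []

-- ===== PRECONDITION & SPEC =====
def Spec_filter_active_py (entries : List (List (String × String))) (active : List String) (out : List (List (String × String))) : Prop := out = filter_active_py_alt entries active
instance (entries : List (List (String × String))) (active : List String) (out : List (List (String × String))) : Decidable (Spec_filter_active_py entries active out) := by unfold Spec_filter_active_py; infer_instance

-- ===== CLAIM (what is proved, stated in full; the proofs are below) =====
def Claim_equal_filter_active_py : Prop := ∀ (entries : List (List (String × String))) (active : List String), Dom_filter_active_py entries active → Spec_filter_active_py entries active (filter_active_py entries active)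

-- ===== LEMMAS AND PROOFS =====

lemma pvSetLen (s : PySem.Set String) : PySem.Set.len s = s.length := rfl

-- the dict built by A maps each key to exactly the (distinct) active names with that key
lemma pvBuildIdx_getD (L : List String)
    (d : PySem.Dict (Char × String) (PySem.Set String))
    (hnd : L.Nodup)
    (hmem : ∀ f ∈ L, ∀ k', f ∉ (d.getD k' PySem.Set.empty : List String))
    (k : Char × String) :
    (L.foldl (fun d full =>
      match pvKey full with
      | some k => d.insert k (PySem.Set.add (d.getD k PySem.Set.empty) full)
      | none => d) d).getD k PySem.Set.empty
      = d.getD k PySem.Set.empty ++ L.filter (fun f => pvKey f == some k) := by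
  induction L generalizing d with
  | nil => simp
  | cons f L ih =>
    simp only [List.foldl_cons, List.filter_cons]
    have hf : ∀ k', f ∉ (d.getD k' PySem.Set.empty : List String) :=
      hmem f (List.mem_cons_self ..)
    have hfL : f ∉ L := (List.nodup_cons.mp hnd).1
    cases hk : pvKey f with
    | none =>
      rw [ih d hnd.of_cons (fun g hg => hmem g (List.mem_cons_of_mem _ hg))]
      simp
    | some kf =>
      have hadd : PySem.Set.add (d.getD kf PySem.Set.empty) f
          = (d.getD kf PySem.Set.empty : List String) ++ [f] :=
        PySem.Set.add_of_not_mem (hf kf)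
      have hget : ∀ k', ((d.insert kf (PySem.Set.add (d.getD kf PySem.Set.empty) f)).getD
            k' PySem.Set.empty : List String)
          = if k' = kf then (d.getD kf PySem.Set.empty : List String) ++ [f]
            else d.getD k' PySem.Set.empty := by
        intro k'
        rw [PySem.Dict.getD_insert, hadd]
      rw [ih _ hnd.of_cons ?_]
      · rw [hget k]
        by_cases hkk : k = kf
        · subst hkk
          simp [List.append_assoc]
        · have hkk' : ¬ kf = k := fun h => hkk h.symm
          have hne : (pvKey f == some k) = false := by simp [hk, hkk']
          simp [hkk, hkk']
      · intro g hg k'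
        rw [hget k']
        have hgd := hmem g (List.mem_cons_of_mem _ hg) k'
        have hgf : g ≠ f := fun h => hfL (h ▸ hg)
        split
        · next h =>
          subst h
          simp only [List.mem_append, List.mem_singleton]
          rintro (h1 | h2)
          · exact hmem g (List.mem_cons_of_mem _ hg) _ h1
          · exact hgf h2
        · exact hgd

lemma pvBeqPair (a c1 : Char) (b s1 : String) :
    ((some (a, b) : Option (Char × String)) == some (c1, s1))
      = (decide (a = c1) && decide (b = s1)) := by
  rw [show ((some (a, b) : Option (Char × String)) == some (c1, s1))
    = (a == c1 && b == s1) from rfl]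
  simp [beq_eq_decide]

-- B's counting fold equals the length of the filter of the same predicate
lemma pvCount_fold (L : List String) (c1 : Char) (s1 : String) (c0 : Int) :
    L.foldl (fun c full =>
      let a_toks := PySem.Str.split₀ full
      if 2 ≤ a_toks.length ∧
          (PySem.Str.pyGet? (a_toks.headD "") 0).getD ' ' = c1 ∧
          a_toks.getLast?.getD "" = s1 then c + 1 else c) c0
      = c0 + ((L.filter (fun f => pvKey f == some (c1, s1))).length : Int) := by
  induction L generalizing c0 with
  | nil => simp
  | cons f L ih =>
    simp only [List.foldl_cons, List.filter_cons]
    rw [ih]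
    have hpred : (pvKey f == some (c1, s1))
        = decide (2 ≤ (PySem.Str.split₀ f).length ∧
            (PySem.Str.pyGet? ((PySem.Str.split₀ f).headD "") 0).getD ' ' = c1 ∧
            (PySem.Str.split₀ f).getLast?.getD "" = s1) := by
      unfold pvKey
      by_cases h : 2 ≤ (PySem.Str.split₀ f).length
      · rw [if_pos h, pvBeqPair]
        simp [h, Bool.decide_and]
      · rw [if_neg h]
        simp [h]
    rw [hpred]
    by_cases h : 2 ≤ (PySem.Str.split₀ f).length ∧
        (PySem.Str.pyGet? ((PySem.Str.split₀ f).headD "") 0).getD ' ' = c1 ∧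
        (PySem.Str.split₀ f).getLast?.getD "" = s1
    · simp only [decide_eq_true_eq, if_pos h, List.length_cons]
      push_cast; ring
    · simp only [decide_eq_true_eq, if_neg h]

-- the dict lookup in A returns exactly the list B's scan filters
lemma pvCands_eq (al : PySem.Set String) (hnd : al.Nodup) (c1 : Char) (s1 : String) :
    ((pvBuildIdx al).getD (c1, s1) PySem.Set.empty : List String)
      = al.filter (fun f => pvKey f == some (c1, s1)) := by
  unfold pvBuildIdx
  rw [pvBuildIdx_getD al PySem.Dict.empty hnd (by simp [pysem]) (c1, s1)]
  simp [pysem]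

-- ===== VERDICT (by name: the statement is the Claim_ definition above) =====
theorem filter_active_py_spec : Claim_equal_filter_active_py := by
  intro entries active _
  unfold Spec_filter_active_py filter_active_py filter_active_py_alt
  by_cases ha : active = []
  · rw [if_pos ha, if_pos ha]
  · rw [if_neg ha, if_neg ha]
    apply List.foldl_ext
    intro acc e _
    dsimp only
    have hnd : (pvActiveLower active).Nodup := PySem.Set.nodup_ofList _
    by_cases h1 : pvName e = ""
    · rw [if_pos h1, if_pos h1]
    rw [if_neg h1, if_neg h1]
    by_cases h2 : PySem.Set.contains (pvActiveLower active) (pvName e) = true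
    · rw [if_pos h2, if_pos h2]
    rw [if_neg h2, if_neg h2]
    by_cases h3 : 2 ≤ (PySem.Str.split₀ (pvName e)).length ∧
        PySem.Str.len ((PySem.Str.split₀ (pvName e)).headD "") = 1
    · rw [if_pos h3, if_pos h3]
      rw [pvCount_fold (pvActiveLower active)
        ((PySem.Str.pyGet? ((PySem.Str.split₀ (pvName e)).headD "") 0).getD ' ')
        ((PySem.Str.split₀ (pvName e)).getLast?.getD "") 0]
      rw [pvSetLen, pvCands_eq (pvActiveLower active) hnd
        ((PySem.Str.pyGet? ((PySem.Str.split₀ (pvName e)).headD "") 0).getD ' ')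
        ((PySem.Str.split₀ (pvName e)).getLast?.getD "")]
      exact if_congr (by omega) rfl rfl
    · rw [if_neg h3, if_neg h3]
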